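-- pv_equiv track=rewrite | github.com/kp2657/causal-graph-engine | pipelines/state_space/state_definition.py | _annotate_with_programs
-- ===== SOURCE A (Python) =====
-- def _annotate_with_programs(
--     state_genes: list[str],
--     program_labels_source: dict[str, list[str]],
--     min_overlap: int = 3,
-- ) -> list[str]:
--     """
--     Return program IDs whose gene sets overlap with state marker genes by >= min_overlap.
--     program_labels_source: {program_id: [gene, ...]} from cNMF or MSigDB.
--     """
--     matched = []
--     state_set = set(state_genes)
--     for prog_id, prog_genes in program_labels_source.items():
--         overlap = len(state_set & set(prog_genes))
--         if overlap >= min_overlap: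
--             matched.append(prog_id)
--     return matched
-- ===== SOURCE B (Python) =====
-- def _annotate_with_programs(
--     state_genes: list[str],
--     program_labels_source: dict[str, list[str]],
--     min_overlap: int = 3,
-- ) -> list[str]:
--     """Inverted-index re-implementation: gene -> program positions, then one counting pass."""
--     items = list(program_labels_source.items())
--     index = {}
--     for i, (_pid, prog_genes) in enumerate(items):
--         for g in set(prog_genes):
--             index.setdefault(g, []).append(i)
--     counts = [0] * len(items)
--     for g in set(state_genes):
--         for i in index.get(g, []):
--             counts[i] += 1
--     return [pid for (pid, _), c in zip(items, counts) if c >= min_overlap]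
-- ===== Notes on version B (the rewrite author's own statement) =====
-- stated objective: alternative
-- what changed: Replaces the per-program set-intersection loop with an inverted index (gene -> program positions) built once, a single counting pass over the distinct state genes, and a final in-order scan emitting programs whose count reaches the threshold.
import Mathlib
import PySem

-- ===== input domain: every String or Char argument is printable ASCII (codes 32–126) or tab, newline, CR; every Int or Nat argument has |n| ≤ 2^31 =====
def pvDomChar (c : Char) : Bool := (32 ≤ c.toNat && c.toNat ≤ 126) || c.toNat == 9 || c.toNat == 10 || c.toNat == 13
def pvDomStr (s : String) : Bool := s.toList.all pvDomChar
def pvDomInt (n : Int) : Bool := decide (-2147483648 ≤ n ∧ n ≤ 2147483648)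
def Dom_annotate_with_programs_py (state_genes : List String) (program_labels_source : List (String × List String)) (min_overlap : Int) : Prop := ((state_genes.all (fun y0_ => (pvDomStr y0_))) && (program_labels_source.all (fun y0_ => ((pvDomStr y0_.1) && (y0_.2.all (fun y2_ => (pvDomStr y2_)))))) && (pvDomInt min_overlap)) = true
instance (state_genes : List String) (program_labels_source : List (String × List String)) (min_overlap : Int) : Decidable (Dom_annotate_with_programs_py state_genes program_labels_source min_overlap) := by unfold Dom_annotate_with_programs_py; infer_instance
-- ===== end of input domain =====

-- B replaces A's per-program set intersections by an inverted index (gene -> program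
-- positions) plus one counting pass over the distinct state genes; objective: alternative.

-- ===== PORT A =====
def annotate_with_programs_py (state_genes : List String) (program_labels_source : List (String × List String)) (min_overlap : Int) : List String :=
  let state_set : PySem.Set String := PySem.Set.ofList state_genes
  program_labels_source.foldl
    (fun matched p =>
      let overlap : Int := PySem.Set.len (PySem.Set.inter state_set (PySem.Set.ofList p.2))
      if min_overlap ≤ overlap then matched ++ [p.1] else matched)
    []

-- ===== PORT B =====
-- 'index.setdefault(g, []).append(i)' is rendered functionally as
-- 'index.insert g (index.getD g [] ++ [i])' (the same resulting dict).
def annotate_with_programs_py_alt (state_genes : List String) (program_labels_source : List (String × List String)) (min_overlap : Int) : List String :=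
  let items := program_labels_source
  let index : PySem.Dict String (List Int) :=
    (PySem.List.enumerate items).foldl
      (fun d q => (PySem.Set.ofList q.2.2).foldl
        (fun d g => d.insert g (d.getD g [] ++ [q.1])) d)
      PySem.Dict.empty
  let counts : List Int :=
    (PySem.Set.ofList state_genes).foldl
      (fun counts g => (index.getD g []).foldl
        (fun counts i => PySem.List.pySetD counts i (PySem.List.pyGetD counts i 0 + 1)) counts)
      (List.replicate items.length 0)
  (items.zip counts).foldl (fun out q => if min_overlap ≤ q.2 then out ++ [q.1.1] else out) []

-- ===== PRECONDITION & SPEC =====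
def Spec_annotate_with_programs_py (state_genes : List String) (program_labels_source : List (String × List String)) (min_overlap : Int) (out : List String) : Prop := out = annotate_with_programs_py_alt state_genes program_labels_source min_overlap
instance (state_genes : List String) (program_labels_source : List (String × List String)) (min_overlap : Int) (out : List String) : Decidable (Spec_annotate_with_programs_py state_genes program_labels_source min_overlap out) := by unfold Spec_annotate_with_programs_py; infer_instance

-- ===== CLAIM (what is proved, stated in full; the proofs are below) =====
def Claim_equal_annotate_with_programs_py : Prop := ∀ (state_genes : List String) (program_labels_source : List (String × List String)) (min_overlap : Int), Dom_annotate_with_programs_py state_genes program_labels_source min_overlap → Spec_annotate_with_programs_py state_genes program_labels_source min_overlap (annotate_with_programs_py state_genes program_labels_source min_overlap)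

-- ===== LEMMAS AND PROOFS =====

-- the index list of a gene g: positions (counted from s) of the items whose gene list contains g
def pvIdxList (items : List (String × List String)) (s : Int) (g : String) : List Int :=
  (PySem.List.enumerate items s).filterMap (fun q => if g ∈ q.2.2 then some q.1 else none)

lemma pvIdxList_nil (s : Int) (g : String) : pvIdxList [] s g = [] := by
  simp [pvIdxList, PySem.List.enumerate_nil]

lemma pvIdxList_cons (p : String × List String) (items : List (String × List String)) (s : Int) (g : String) :
    pvIdxList (p :: items) s g =
      if g ∈ p.2 then s :: pvIdxList items (s + 1) g else pvIdxList items (s + 1) g := by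
  rw [pvIdxList, PySem.List.enumerate_cons, List.filterMap_cons]
  by_cases h : g ∈ p.2 <;> simp [h, pvIdxList]

-- effect of one item's inner fold (over its deduped genes) on one key of the dict
lemma pvIndexStep (L : List String) (hL : L.Nodup) (d : PySem.Dict String (List Int)) (i : Int) (g : String) :
    (L.foldl (fun d g' => d.insert g' (d.getD g' [] ++ [i])) d).getD g [] =
      if g ∈ L then d.getD g [] ++ [i] else d.getD g [] := by
  induction L generalizing d with
  | nil => simp
  | cons x xs ih =>
    obtain ⟨hx, hxs⟩ := List.nodup_cons.mp hL
    simp only [List.foldl_cons, ih hxs, List.mem_cons]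
    by_cases hgx : g = x
    · subst hgx
      simp [hx]
    · simp [hgx, PySem.Dict.getD_insert]

lemma pvIndex_getD (items : List (String × List String)) (s : Int) (d : PySem.Dict String (List Int)) (g : String) :
    ((PySem.List.enumerate items s).foldl
        (fun d q => (PySem.Set.ofList q.2.2).foldl
          (fun d g' => d.insert g' (d.getD g' [] ++ [q.1])) d) d).getD g []
      = d.getD g [] ++ pvIdxList items s g := by
  induction items generalizing s d with
  | nil => simp [pvIdxList_nil, PySem.List.enumerate_nil]
  | cons p items ih =>
    rw [PySem.List.enumerate_cons]
    simp only [List.foldl_cons]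
    rw [ih, pvIndexStep _ (PySem.Set.nodup_ofList _), pvIdxList_cons]
    simp only [PySem.Set.mem_ofList]
    by_cases h : g ∈ p.2 <;> simp [h]

lemma pvIndex_getD_empty (items : List (String × List String)) (g : String) :
    ((PySem.List.enumerate items).foldl
        (fun d q => (PySem.Set.ofList q.2.2).foldl
          (fun d g' => d.insert g' (d.getD g' [] ++ [q.1])) d) PySem.Dict.empty).getD g []
      = pvIdxList items 0 g := by
  rw [pvIndex_getD]
  simp [PySem.Dict.getD, PySem.Dict.get?, PySem.Dict.empty]

lemma pvMem_pvIdxList (items : List (String × List String)) (s : Int) (g : String) (x : Int)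
    (hx : x ∈ pvIdxList items s g) : s ≤ x ∧ x < s + items.length := by
  rw [pvIdxList] at hx
  obtain ⟨q, hq, hqx⟩ := List.mem_filterMap.mp hx
  obtain ⟨k, hk, rfl⟩ := (PySem.List.mem_enumerate_iff _ _ _).mp hq
  by_cases h : g ∈ (items[k]).2 <;> simp [h] at hqx
  subst hqx
  constructor <;> [omega; (push_cast; omega)]

lemma pvCount_pvIdxList (items : List (String × List String)) (s : Int) (g : String) (j : Nat)
    (hj : j < items.length) :
    (pvIdxList items s g).count (s + (j : Int)) = if g ∈ (items[j]).2 then 1 else 0 := by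
  induction items generalizing s j with
  | nil => simp at hj
  | cons p items ih =>
    rw [pvIdxList_cons]
    cases j with
    | zero =>
      have h0 : s + ((0 : Nat) : Int) = s := by push_cast; ring
      have hnot : s ∉ pvIdxList items (s + 1) g := fun hmem => by
        have := pvMem_pvIdxList items (s + 1) g _ hmem; omega
      rw [h0]
      by_cases h : g ∈ p.2
      · simp [h, List.count_cons_self, List.count_eq_zero.mpr hnot]
      · simp [h, List.count_eq_zero.mpr hnot]
    | succ j =>
      have hlen : j < items.length := by simpa using hj
      have hcast : s + ((j + 1 : Nat) : Int) = (s + 1) + (j : Int) := by push_cast; ring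
      have hne : ¬ (s = (s + 1) + (j : Int)) := by omega
      rw [hcast]
      by_cases h : g ∈ p.2 <;>
        simp [h, hne, ih (s + 1) j hlen]

-- one counting pass over one gene's position list
lemma pvBumpFold (P : List Int) : ∀ (cs : List Int), (∀ i ∈ P, 0 ≤ i ∧ i < (cs.length : Int)) →
    (P.foldl (fun cs i => PySem.List.pySetD cs i (PySem.List.pyGetD cs i 0 + 1)) cs).length = cs.length ∧
    ∀ j : Nat, j < cs.length →
      (P.foldl (fun cs i => PySem.List.pySetD cs i (PySem.List.pyGetD cs i 0 + 1)) cs).getD j 0 =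
        cs.getD j 0 + (P.count (j : Int) : Int) := by
  induction P with
  | nil => intro cs _; simp
  | cons i P ih =>
    intro cs h
    obtain ⟨hi0, hilt⟩ := h i (List.mem_cons_self)
    have hset : PySem.List.pySetD cs i (PySem.List.pyGetD cs i 0 + 1) =
        cs.set i.toNat (PySem.List.pyGetD cs i 0 + 1) := PySem.List.pySetD_of_nonneg _ _ hi0
    obtain ⟨ihlen, ihget⟩ := ih (cs.set i.toNat (PySem.List.pyGetD cs i 0 + 1))
      (fun x hx => by have := h x (List.mem_cons_of_mem _ hx); simpa using this)
    refine ⟨?_, ?_⟩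
    · simp only [List.foldl_cons, hset]
      rw [ihlen]; simp
    · intro j hj
      simp only [List.foldl_cons, hset]
      rw [ihget j (by simpa using hj)]
      have hval : (cs.set i.toNat (PySem.List.pyGetD cs i 0 + 1)).getD j 0 =
          cs.getD j 0 + (if i = (j : Int) then 1 else 0) := by
        rw [PySem.List.pyGetD_of_nonneg _ _ hi0]
        simp only [List.getD_eq_getElem?_getD, List.getElem?_set]
        by_cases hij : i.toNat = j
        · have hint : i = (j : Int) := by omega
          have hjlt : i.toNat < cs.length := by omega
          rw [if_pos hij, if_pos hjlt, if_pos hint]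
          subst hij
          simp [List.getElem?_eq_getElem hjlt]
        · have hint : ¬ i = (j : Int) := by omega
          rw [if_neg hij, if_neg hint]
          simp
      rw [hval, List.count_cons]
      by_cases hint : i = (j : Int)
      · simp [hint]
        ring
      · have : ¬ (i == (j : Int)) = true := by simpa using hint
        simp [this, hint]

-- the outer loop over the distinct state genes, for an abstract index
lemma pvOuterFold (I : String → List Int) (n : Nat)
    (hI : ∀ g x, x ∈ I g → 0 ≤ x ∧ x < (n : Int)) :
    ∀ (S : List String) (cs : List Int), cs.length = n →
    (S.foldl (fun cs g => (I g).foldl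
        (fun cs i => PySem.List.pySetD cs i (PySem.List.pyGetD cs i 0 + 1)) cs) cs).length = n ∧
    ∀ j : Nat, j < n →
      (S.foldl (fun cs g => (I g).foldl
          (fun cs i => PySem.List.pySetD cs i (PySem.List.pyGetD cs i 0 + 1)) cs) cs).getD j 0 =
        cs.getD j 0 + (S.map (fun g => (((I g).count (j : Int) : Nat) : Int))).sum := by
  intro S
  induction S with
  | nil => intro cs hlen; simpa using hlen
  | cons g S ih =>
    intro cs hlen
    obtain ⟨blen, bget⟩ := pvBumpFold (I g) cs (fun x hx => by
      have := hI g x hx; omega)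
    obtain ⟨ihlen, ihget⟩ := ih ((I g).foldl
      (fun cs i => PySem.List.pySetD cs i (PySem.List.pyGetD cs i 0 + 1)) cs) (by rw [blen, hlen])
    refine ⟨by simpa using ihlen, ?_⟩
    intro j hj
    simp only [List.foldl_cons]
    rw [ihget j hj, bget j (by omega)]
    simp only [List.map_cons, List.sum_cons]
    ring

-- the 0/1 sum over S is A's intersection size
lemma pvSum_eq_overlap (S : List String) (G : List String) :
    (S.map (fun g => (if g ∈ G then (1 : Int) else 0))).sum =
      ((S.filter (fun g => (PySem.Set.ofList G).contains g)).length : Int) := by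
  induction S with
  | nil => simp
  | cons x S ih =>
    have hc : ((PySem.Set.ofList G).contains x) = decide (x ∈ G) := by
      by_cases h : x ∈ G
      · simp
      · simp only [h, decide_false]
        by_contra hcon
        exact h ((PySem.Set.mem_ofList _ _).mp ((PySem.Set.contains_iff _ _).mp (by simpa using hcon)))
    rw [List.map_cons, List.sum_cons, ih, List.filter_cons, hc]
    by_cases h : x ∈ G
    · simp [h]
      ring
    · simp [h]

-- final emission: A's direct filtered fold equals B's zip-with-counts fold
lemma pvFinalZip (mo : Int) (ov : String × List String → Int) :
    ∀ (items : List (String × List String)) (counts : List Int) (acc : List String),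
    counts.length = items.length →
    (∀ j : Nat, (hj : j < items.length) → counts.getD j 0 = ov items[j]) →
    items.foldl (fun matched p => if mo ≤ ov p then matched ++ [p.1] else matched) acc =
      (items.zip counts).foldl (fun out q => if mo ≤ q.2 then out ++ [q.1.1] else out) acc := by
  intro items
  induction items with
  | nil => intro counts acc _ _; simp
  | cons p items ih =>
    intro counts acc hlen hc
    cases counts with
    | nil => simp at hlen
    | cons c counts =>
      have h0 := hc 0 (by simp)
      simp only [List.getD_cons_zero, List.getElem_cons_zero] at h0
      simp only [List.zip_cons_cons, List.foldl_cons, ← h0]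
      exact ih counts _ (by simpa using hlen) (fun j hj => by
        have := hc (j + 1) (by simpa using Nat.succ_lt_succ hj)
        simpa using this)

-- ===== VERDICT (by name: the statement is the Claim_ definition above) =====
theorem annotate_with_programs_py_spec : Claim_equal_annotate_with_programs_py := by
  unfold Claim_equal_annotate_with_programs_py
  intro sg pls mo _
  unfold Spec_annotate_with_programs_py
  simp only [annotate_with_programs_py, annotate_with_programs_py_alt]
  simp only [pvIndex_getD_empty]
  obtain ⟨hlen, hget⟩ := pvOuterFold (fun g => pvIdxList pls 0 g) pls.length
    (fun g x hx => by
      have := pvMem_pvIdxList pls 0 g x hx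
      constructor <;> omega)
    (PySem.Set.ofList sg) (List.replicate pls.length 0) (by simp)
  refine pvFinalZip mo
    (fun p => PySem.Set.len (PySem.Set.inter (PySem.Set.ofList sg) (PySem.Set.ofList p.2)))
    pls _ [] hlen ?_
  intro j hj
  rw [hget j hj, List.getD_replicate _ hj]
  have hcnt : ∀ g : String, (pvIdxList pls 0 g).count ((j : Nat) : Int) =
      if g ∈ (pls[j]).2 then 1 else 0 := fun g => by
    have := pvCount_pvIdxList pls 0 g j hj
    simpa using this
  simp only [hcnt]
  have hcast : ∀ g : String, (((if g ∈ (pls[j]).2 then 1 else 0 : Nat) : Int)) =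
      (if g ∈ (pls[j]).2 then (1 : Int) else 0) := fun g => by
    by_cases h : g ∈ (pls[j]).2 <;> simp [h]
  simp only [hcast]
  rw [pvSum_eq_overlap]
  simp [PySem.Set.len, PySem.Set.inter]
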